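-- pv_equiv track=rewrite | github.com/lcslin/codePiece | hash_it.py | func_mask
-- ===== SOURCE A (Python) =====
-- def func_mask(x):
--    tmp_x = ''
--    for idx,i in enumerate(x):
--       if idx > 0 and idx % 2 == 1:
--          tmp_x = tmp_x + i
--       else:
--          tmp_x = tmp_x + 'X'
--    return tmp_x
-- ===== SOURCE B (Python) =====
-- def func_mask(x):
--     lst = list(x)
--     for i in range(0, len(x), 2):
--         lst[i] = 'X'
--     return ''.join(lst)
-- ===== Notes on version B (the rewrite author's own statement) =====
-- stated objective: simpler
-- what changed: Instead of rebuilding the string char-by-char with quadratic concatenation and a per-index parity branch, B converts to a list once, overwrites only the even positions via range(0, len, 2), and joins (linear).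
import Mathlib
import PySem

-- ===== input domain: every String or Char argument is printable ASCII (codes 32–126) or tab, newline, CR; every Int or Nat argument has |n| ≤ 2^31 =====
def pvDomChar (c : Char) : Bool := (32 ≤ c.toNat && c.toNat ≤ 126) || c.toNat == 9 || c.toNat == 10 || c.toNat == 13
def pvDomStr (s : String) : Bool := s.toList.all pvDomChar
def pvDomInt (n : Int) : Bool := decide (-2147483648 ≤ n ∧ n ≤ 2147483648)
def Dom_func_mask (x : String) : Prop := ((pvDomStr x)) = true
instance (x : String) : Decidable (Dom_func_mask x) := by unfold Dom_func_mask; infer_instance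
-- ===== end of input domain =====

-- B masks even positions by overwriting a char list in place of rebuilding with a parity branch (objective: simpler).

-- ===== PORT A =====
-- A: build tmp_x char by char; keep the char at odd indices, append 'X' at even ones.
def func_mask (x : String) : String :=
  String.ofList ((PySem.List.enumerate x.toList 0).foldl
    (fun tmp p => if p.1 > 0 ∧ PySem.Int.mod p.1 2 = 1 then tmp ++ [p.2] else tmp ++ ['X']) [])

-- ===== PORT B =====
-- B: list(x); for i in range(0, len(x), 2): lst[i] = 'X'; ''.join(lst)
def func_mask_alt (x : String) : String :=
  String.ofList ((PySem.List.pyRange 0 (PySem.Str.len x) 2).foldl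
    (fun lst i => lst.set i.toNat 'X') x.toList)

-- ===== PRECONDITION & SPEC =====
def Spec_func_mask (x : String) (out : String) : Prop := out = func_mask_alt x
instance (x : String) (out : String) : Decidable (Spec_func_mask x out) := by unfold Spec_func_mask; infer_instance

-- ===== CLAIM (what is proved, stated in full; the proofs are below) =====
def Claim_equal_func_mask : Prop := ∀ (x : String), Dom_func_mask x → Spec_func_mask x (func_mask x)

-- ===== LEMMAS AND PROOFS =====

-- the overwrite loop, element by element
theorem foldl_set_getElem? (is : List Int) (l : List Char) (k : Nat)
    (hnn : ∀ i ∈ is, 0 ≤ i) :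
    (is.foldl (fun lst i => lst.set i.toNat 'X') l)[k]? =
      if (k : Int) ∈ is then l[k]?.map (fun _ => 'X') else l[k]? := by
  induction is generalizing l with
  | nil => simp
  | cons i is ih =>
    have hi : 0 ≤ i := hnn i (by simp)
    simp only [List.foldl_cons]
    rw [ih _ (fun j hj => hnn j (by simp [hj]))]
    by_cases hmem : (k : Int) ∈ is
    · simp only [hmem, if_pos, List.mem_cons, or_true, if_pos]
      by_cases hlt : k < l.length
      · simp [hlt]
      · simp [List.getElem?_eq_none (by simpa using hlt :
          l.length ≤ k), List.getElem?_eq_none (by simp at hlt ⊢; omega :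
          (l.set i.toNat 'X').length ≤ k)]
    · simp only [hmem, if_neg, not_false_iff, List.mem_cons]
      by_cases hik : (k : Int) = i
      · have : i.toNat = k := by omega
        subst this
        simp only [hik, true_or, if_pos]
        by_cases hlt : i.toNat < l.length
        · simp [hlt]
        · simp [List.getElem?_eq_none (by omega : l.length ≤ i.toNat),
            List.getElem?_eq_none (by simp; omega : (l.set i.toNat 'X').length ≤ i.toNat)]
      · have hne : i.toNat ≠ k := by omega
        simp [hne, hik]

-- ===== VERDICT (by name: the statement is the Claim_ definition above) =====
theorem func_mask_spec : Claim_equal_func_mask := by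
  intro x _
  unfold Spec_func_mask func_mask func_mask_alt
  have hA : (fun (tmp : List Char) (p : Int × Char) =>
      if p.1 > 0 ∧ PySem.Int.mod p.1 2 = 1 then tmp ++ [p.2] else tmp ++ ['X']) =
      (fun tmp p => tmp ++ [if p.1 > 0 ∧ PySem.Int.mod p.1 2 = 1 then p.2 else 'X']) := by
    funext tmp p; split_ifs <;> rfl
  rw [hA, PySem.List.foldl_append_singleton_eq_map]
  have hlen : PySem.Str.len x = (x.toList.length : Int) := by
    simp [PySem.Str.len_eq]
  rw [hlen]
  congr 1
  apply List.ext_getElem?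
  intro k
  have hnn : ∀ i ∈ PySem.List.pyRange 0 (x.toList.length : Int) 2, 0 ≤ i := by
    intro i hi
    exact ((PySem.List.mem_pyRange_iff_of_pos (by norm_num) i).mp hi).1
  rw [foldl_set_getElem? _ _ _ hnn]
  rw [List.nil_append, List.getElem?_map]
  by_cases hk : k < x.toList.length
  · have henum : (PySem.List.enumerate x.toList 0)[k]? = some ((0 : Int) + k, x.toList[k]) := by
      rw [List.getElem?_eq_getElem (by rw [PySem.List.length_enumerate]; exact hk),
        PySem.List.getElem_enumerate]
    rw [henum, List.getElem?_eq_getElem hk]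
    have hmem : (k : Int) ∈ PySem.List.pyRange 0 (x.toList.length : Int) 2 ↔ k % 2 = 0 := by
      rw [PySem.List.mem_pyRange_iff_of_pos (by norm_num)]
      constructor
      · rintro ⟨-, -, h⟩; omega
      · intro h
        refine ⟨by positivity, by exact_mod_cast hk, ?_⟩
        omega
    have hmk : PySem.Int.mod ((0 : Int) + k) 2 = ((k % 2 : Nat) : Int) := by
      rw [zero_add]
      exact_mod_cast PySem.Int.mod_natCast k 2
    by_cases hpar : k % 2 = 0
    · have hc : ¬ ((0 : Int) + (k : Int) > 0 ∧ PySem.Int.mod ((0 : Int) + k) 2 = 1) := by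
        rintro ⟨-, hmm⟩
        rw [hmk] at hmm
        omega
      simp only [Option.map_some]
      rw [if_neg hc, if_pos (hmem.mpr hpar)]
    · have hc : ((0 : Int) + (k : Int) > 0 ∧ PySem.Int.mod ((0 : Int) + k) 2 = 1) := by
        refine ⟨by omega, ?_⟩
        rw [hmk]
        exact_mod_cast (by omega : k % 2 = 1)
      simp only [Option.map_some]
      rw [if_pos hc, if_neg (fun h => hpar (hmem.mp h))]
  · rw [List.getElem?_eq_none (by simpa [Nat.not_lt, PySem.List.length_enumerate]
        using hk : (PySem.List.enumerate x.toList 0).length ≤ k),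
      List.getElem?_eq_none (by omega : x.toList.length ≤ k)]
    simp
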